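-- pv_equiv track=rewrite | github.com/Francisco150/desarrollo-seguro | mychar.py | cadena_mas_larga
-- ===== SOURCE A (Python) =====
-- def cadena_mas_larga (lista_cadenas):
--
--     if not lista_cadenas:
--             return ""
--
--     if not isinstance(lista_cadenas,list):
--         raise TypeError("No se ha introducido una lista de cadenas.")
--
--     if not all(isinstance(i,str) for i in lista_cadenas):
--         raise ValueError ("La lista debe contener solo cadenas.")
--
--     longitud_max = max(len(palabra) for palabra in lista_cadenas)
--
--     lista_maxima = []
--
--     for cadena in lista_cadenas:
--         if len(cadena) == longitud_max:
--              lista_maxima.append(cadena)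
--
--     lista_maxima.sort()
--
--     return lista_maxima[0]
-- ===== SOURCE B (Python) =====
-- def cadena_mas_larga(lista_cadenas):
--
--     if not lista_cadenas:
--         return ""
--
--     if not isinstance(lista_cadenas, list):
--         raise TypeError("No se ha introducido una lista de cadenas.")
--
--     if not all(isinstance(i, str) for i in lista_cadenas):
--         raise ValueError("La lista debe contener solo cadenas.")
--
--     best_len = -1
--     best_str = ""
--     for cadena in lista_cadenas:
--         if len(cadena) > best_len:
--             best_len = len(cadena)
--             best_str = cadena
--         elif len(cadena) == best_len and cadena < best_str:
--             best_str = cadena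
--     return best_str
-- ===== Notes on version B (the rewrite author's own statement) =====
-- stated objective: simpler
-- what changed: Replaces the max()-scan, filter loop and sort with a single pass keeping two accumulators (best length, alphabetically-first string of that length).
import Mathlib
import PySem

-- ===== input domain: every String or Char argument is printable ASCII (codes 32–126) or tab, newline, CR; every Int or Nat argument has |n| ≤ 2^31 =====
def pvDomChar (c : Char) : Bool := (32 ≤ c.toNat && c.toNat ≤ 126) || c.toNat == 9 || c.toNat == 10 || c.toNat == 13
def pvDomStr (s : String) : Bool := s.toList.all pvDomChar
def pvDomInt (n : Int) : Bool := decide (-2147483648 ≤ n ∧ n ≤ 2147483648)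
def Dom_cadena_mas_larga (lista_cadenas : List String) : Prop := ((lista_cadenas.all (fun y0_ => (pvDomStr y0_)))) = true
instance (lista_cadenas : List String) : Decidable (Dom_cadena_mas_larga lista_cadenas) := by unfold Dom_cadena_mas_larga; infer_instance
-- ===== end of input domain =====

-- B replaces A's max()-scan + filter loop + sort with one fold keeping (best length, alphabetically-first string of that length); same return value, simpler single pass.


-- ===== PORT A =====
-- (A's isinstance guards can never fire on a List String argument, so they port to nothing)
def cadena_mas_larga (lista_cadenas : List String) : String :=
  if lista_cadenas = [] then ""
  else
    -- longitud_max = max(len(palabra) for palabra in lista_cadenas); the list is nonempty here, so max? is some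
    let longitud_max : Int :=
      (PySem.List.max? (lista_cadenas.map (fun palabra => PySem.Str.len palabra)) (fun v => v)).getD 0
    -- for cadena in lista_cadenas: if len == longitud_max: append
    let lista_maxima : List String :=
      lista_cadenas.foldl (fun acc cadena =>
        if PySem.Str.len cadena = longitud_max then acc ++ [cadena] else acc) []
    -- lista_maxima.sort(); return lista_maxima[0]  (nonempty: the max length is attained)
    match PySem.List.sorted lista_maxima (fun x => x) false with
    | x :: _ => x
    | [] => ""

-- ===== PORT B =====
def cadena_mas_larga_alt (lista_cadenas : List String) : String :=
  if lista_cadenas = [] then ""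
  else
    (lista_cadenas.foldl (fun (st : Int × String) cadena =>
        if st.1 < PySem.Str.len cadena then (PySem.Str.len cadena, cadena)
        else if PySem.Str.len cadena = st.1 ∧ cadena < st.2 then (st.1, cadena)
        else st) (-1, "")).2

-- ===== PRECONDITION & SPEC =====
def Spec_cadena_mas_larga (lista_cadenas : List String) (out : String) : Prop := out = cadena_mas_larga_alt lista_cadenas
instance (lista_cadenas : List String) (out : String) : Decidable (Spec_cadena_mas_larga lista_cadenas out) := by unfold Spec_cadena_mas_larga; infer_instance

-- ===== CLAIM (what is proved, stated in full; the proofs are below) =====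
def Claim_equal_cadena_mas_larga : Prop := ∀ (lista_cadenas : List String), Dom_cadena_mas_larga lista_cadenas → Spec_cadena_mas_larga lista_cadenas (cadena_mas_larga lista_cadenas)

-- ===== LEMMAS AND PROOFS =====

-- B's fold step, named for the proofs
def pvStep (st : Int × String) (cadena : String) : Int × String :=
  if st.1 < PySem.Str.len cadena then (PySem.Str.len cadena, cadena)
  else if PySem.Str.len cadena = st.1 ∧ cadena < st.2 then (st.1, cadena)
  else st

-- max? of a nonempty list is some
theorem pvMax?_some (l : List Int) (a : Int) :
    ∃ m, PySem.List.max? (a :: l) (fun v => v) = some m := by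
  induction l generalizing a with
  | nil => exact ⟨a, rfl⟩
  | cons b t ih =>
    have hstep : PySem.List.max? (a :: b :: t) (fun v => v) =
        PySem.List.max? ((if a < b then b else a) :: t) (fun v => v) := by
      by_cases hab : a < b <;> simp [PySem.List.max?, hab]
    rw [hstep]
    exact ih _

-- Invariant of B's fold, for a well-formed start state (bs has length bl):
-- the result is a longest string of bs :: l, and the ≤-least among those of its length.
theorem pvFold_inv (l : List String) (bl : Int) (bs : String) (h : PySem.Str.len bs = bl) :
    PySem.Str.len (l.foldl pvStep (bl, bs)).2 = (l.foldl pvStep (bl, bs)).1 ∧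
    (l.foldl pvStep (bl, bs)).2 ∈ bs :: l ∧
    (∀ y ∈ bs :: l, PySem.Str.len y ≤ (l.foldl pvStep (bl, bs)).1) ∧
    (∀ y ∈ bs :: l, PySem.Str.len y = (l.foldl pvStep (bl, bs)).1 →
      (l.foldl pvStep (bl, bs)).2 ≤ y) := by
  induction l generalizing bl bs with
  | nil =>
    simp only [List.foldl_nil]
    refine ⟨h, List.mem_cons_self, ?_, ?_⟩ <;> intro y hy <;> rw [List.mem_singleton] at hy
    · rw [hy]
      exact le_of_eq h
    · intro _
      rw [hy]
  | cons c t ih =>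
    simp only [List.foldl_cons]
    by_cases h1 : bl < PySem.Str.len c
    · rw [show pvStep (bl, bs) c = (PySem.Str.len c, c) from by simp only [pvStep, if_pos h1]]
      obtain ⟨i1, i2, i3, i4⟩ := ih (PySem.Str.len c) c rfl
      have hc := i3 c List.mem_cons_self
      refine ⟨i1, List.mem_cons_of_mem bs i2, ?_, ?_⟩
      · intro y hy
        rcases List.mem_cons.mp hy with hy1 | hy1
        · rw [hy1, h]
          omega
        · exact i3 y hy1
      · intro y hy hlen
        rcases List.mem_cons.mp hy with hy1 | hy1
        · exfalso
          rw [hy1, h] at hlen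
          omega
        · exact i4 y hy1 hlen
    · by_cases h2 : PySem.Str.len c = bl ∧ c < bs
      · rw [show pvStep (bl, bs) c = (bl, c) from by simp only [pvStep, if_neg h1, if_pos h2]]
        obtain ⟨i1, i2, i3, i4⟩ := ih bl c h2.1
        have hc := i3 c List.mem_cons_self
        have h21 := h2.1
        refine ⟨i1, List.mem_cons_of_mem bs i2, ?_, ?_⟩
        · intro y hy
          rcases List.mem_cons.mp hy with hy1 | hy1
          · rw [hy1, h]
            omega
          · exact i3 y hy1
        · intro y hy hlen
          rcases List.mem_cons.mp hy with hy1 | hy1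
          · rw [hy1, h] at hlen
            rw [hy1]
            exact le_of_lt (lt_of_le_of_lt (i4 c List.mem_cons_self (by omega)) h2.2)
          · exact i4 y hy1 hlen
      · rw [show pvStep (bl, bs) c = (bl, bs) from by simp only [pvStep, if_neg h1, if_neg h2]]
        obtain ⟨i1, i2, i3, i4⟩ := ih bl bs h
        have hbs := i3 bs List.mem_cons_self
        rw [h] at hbs
        refine ⟨i1, ?_, ?_, ?_⟩
        · rcases List.mem_cons.mp i2 with hy1 | hy1
          · exact List.mem_cons.mpr (Or.inl hy1)
          · exact List.mem_cons_of_mem bs (List.mem_cons_of_mem c hy1)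
        · intro y hy
          rcases List.mem_cons.mp hy with hy1 | hy1
          · exact i3 y (hy1 ▸ List.mem_cons_self)
          · rcases List.mem_cons.mp hy1 with hy2 | hy2
            · rw [hy2]
              omega
            · exact i3 y (List.mem_cons_of_mem bs hy2)
        · intro y hy hlen
          rcases List.mem_cons.mp hy with hy1 | hy1
          · exact i4 y (hy1 ▸ List.mem_cons_self) hlen
          · rcases List.mem_cons.mp hy1 with hy2 | hy2
            · -- y = c attains the result length; then bl = len c, so bs ≤ c, and result ≤ bs
              subst hy2
              have hcl : PySem.Str.len y = bl := by omega
              have hbsc : bs ≤ y := le_of_not_gt fun hlt => h2 ⟨hcl, hlt⟩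
              exact le_trans (i4 bs List.mem_cons_self (by omega)) hbsc
            · exact i4 y (List.mem_cons_of_mem bs hy2) hlen

-- A's filter loop is List.filter
theorem pvFilter_eq (l : List String) (m : Int) :
    l.foldl (fun acc cadena =>
      if PySem.Str.len cadena = m then acc ++ [cadena] else acc) [] =
    l.filter (fun cadena => PySem.Str.len cadena = m) := by
  have := PySem.List.foldl_append_if (fun cadena => decide (PySem.Str.len cadena = m))
    (fun c => c) l []
  simpa using this

-- ===== VERDICT (by name: the statement is the Claim_ definition above) =====
theorem cadena_mas_larga_spec : Claim_equal_cadena_mas_larga := by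
  intro l _
  unfold Spec_cadena_mas_larga cadena_mas_larga cadena_mas_larga_alt
  rcases l with _ | ⟨x, xs⟩
  · rfl
  simp only [reduceCtorEq, if_false]
  -- B's fold: the first step replaces the seed (-1, "")
  have hfirst : (x :: xs).foldl pvStep (-1, "") = xs.foldl pvStep (PySem.Str.len x, x) := by
    have hx : (-1:Int) < PySem.Str.len x := by rw [PySem.Str.len_eq]; omega
    simp only [List.foldl_cons, pvStep, if_pos hx]
  show _ = ((x :: xs).foldl pvStep (-1, "")).2
  rw [hfirst]
  obtain ⟨i1, i2, i3, i4⟩ := pvFold_inv xs (PySem.Str.len x) x rfl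
  set r := xs.foldl pvStep (PySem.Str.len x, x) with hr
  -- the max A computes equals r.1
  set M : Int := (PySem.List.max? ((x :: xs).map (fun p => PySem.Str.len p)) (fun v => v)).getD 0 with hM
  obtain ⟨m, hm⟩ : ∃ m, PySem.List.max? ((x :: xs).map (fun p => PySem.Str.len p)) (fun v => v) = some m := by
    rw [List.map_cons]
    exact pvMax?_some _ _
  have hMm : M = m := by rw [hM, hm]; rfl
  have hMmax : ∀ y ∈ x :: xs, PySem.Str.len y ≤ M := by
    intro y hy
    rw [hMm]
    exact PySem.List.max?_isMax hm (PySem.Str.len y) (List.mem_map_of_mem hy)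
  have hMr : M = r.1 := by
    obtain ⟨z, hz, hzl⟩ := List.mem_map.mp (PySem.List.max?_mem hm)
    have h1 : M ≤ r.1 := by
      rw [hMm, ← hzl]
      exact i3 z hz
    have h2 : r.1 ≤ M := i1 ▸ hMmax r.2 i2
    omega
  -- A's filtered list and the head of its sort
  rw [pvFilter_eq]
  set F := (x :: xs).filter (fun cadena => decide (PySem.Str.len cadena = M)) with hF
  have hrF : r.2 ∈ F := by
    rw [hF, List.mem_filter]
    exact ⟨i2, decide_eq_true (by rw [i1, hMr])⟩
  have hFne : PySem.List.sorted F (fun x => x) false ≠ [] := by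
    simp only [ne_eq, PySem.List.sorted_eq_nil_iff]
    intro hnil
    rw [hnil] at hrF
    simp at hrF
  rcases hs : PySem.List.sorted F (fun x => x) false with _ | ⟨a, t⟩
  · exact absurd hs hFne
  -- the head a equals r.2 by antisymmetry
  have haF : a ∈ F := (PySem.List.mem_sorted F (fun x => x) false a).mp (hs ▸ List.mem_cons_self)
  have h1 : a ≤ r.2 := PySem.List.key_head_sorted_le F (fun x => x) hs r.2 hrF
  have h2 : r.2 ≤ a := by
    rw [hF, List.mem_filter] at haF
    exact i4 a haF.1 ((of_decide_eq_true haF.2).trans hMr)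
  exact le_antisymm h1 h2
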